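-- pv_equiv track=rewrite | github.com/PeachyPeachSM64/sm64ex-omm | omm_builder.py | get_audio_pack
-- ===== SOURCE A (Python) =====
-- def to_title(s: str) -> str:
--     s = s.replace('_', ' ')
--     cap = True
--     for i in range(len(s)):
--         c = s[i]
--         is_letter = ((ord(c) >= ord('A') and ord(c) <= ord('Z')) or (ord(c) >= ord('a') and ord(c) <= ord('z')))
--         if cap and is_letter:
--             s = s[:i] + c.upper() + s[i + 1:]
--             cap = False
--         elif not is_letter:
--             cap = True
--     for i in range(1, len(s) - 1):
--         cp = s[i - 1]
--         cc = s[i]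
--         cn = s[i + 1]
--         if cc == '.' and (not (ord(cp) >= ord('0') and ord(cp) <= ord('9')) or not (ord(cn) >= ord('0') and ord(cn) <= ord('9'))):
--             s = s[:i] + ' ' + s[i + 1:]
--     return s
--
-- def get_audio_pack(path: str) -> tuple[str, str]:
--     path = path[:path.rfind('/')]
--     path = path[:path.rfind('/')]
--     name = path
--     for pattern in [ "/ogg", "/wav", "/dynos", "/audio" ]:
--         if pattern in name.lower():
--             name = name[:name.lower().find(pattern)]
--     name = name[name.rfind('/') + 1:]
--     return to_title(name), path
-- ===== SOURCE B (Python) =====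
-- def get_audio_pack(path):
--     path = path[:path.rfind('/')]
--     path = path[:path.rfind('/')]
--     low = path.lower()
--     cut = len(path)
--     for p in ("/ogg", "/wav", "/dynos", "/audio"):
--         j = low.find(p, 0, cut)
--         if j != -1:
--             cut = j
--     name = path[:cut]
--     name = name[name.rfind('/') + 1:]
--     # single fused pass over the ORIGINAL name: underscore->space, title-caps,
--     # and the interior-dot rule read from original neighbours (digit-ness is
--     # unaffected by the other rewrites, so one pass suffices)
--     out = []
--     cap = True
--     n = len(name)
--     for i in range(n):
--         c = name[i]
--         if c == '_':
--             c = ' '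
--         if 'A' <= c <= 'Z' or 'a' <= c <= 'z':
--             if cap:
--                 c = c.upper()
--                 cap = False
--         else:
--             cap = True
--             if c == '.' and 0 < i < n - 1 and not (name[i - 1].isdigit() and name[i + 1].isdigit()):
--                 c = ' '
--         out.append(c)
--     return ''.join(out), path
-- ===== Notes on version B (the rewrite author's own statement) =====
-- stated objective: faster
-- what changed: A runs three staged passes over the name (separate underscore replace, an in-place slice-surgery capitalization loop, an in-place interior-dot loop) and truncates/re-lowercases the remaining path once per pattern; B is a single fused left-to-right pass with an accumulator list and a cap flag doing underscore replacement, run-start capitalization and the interior-dot rule at once (reading original neighbours, valid since digit-ness is invariant under the rewrites), and the pattern loop lowercases once and only narrows a cut index — no quadratic slice rebuilding.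
import Mathlib
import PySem

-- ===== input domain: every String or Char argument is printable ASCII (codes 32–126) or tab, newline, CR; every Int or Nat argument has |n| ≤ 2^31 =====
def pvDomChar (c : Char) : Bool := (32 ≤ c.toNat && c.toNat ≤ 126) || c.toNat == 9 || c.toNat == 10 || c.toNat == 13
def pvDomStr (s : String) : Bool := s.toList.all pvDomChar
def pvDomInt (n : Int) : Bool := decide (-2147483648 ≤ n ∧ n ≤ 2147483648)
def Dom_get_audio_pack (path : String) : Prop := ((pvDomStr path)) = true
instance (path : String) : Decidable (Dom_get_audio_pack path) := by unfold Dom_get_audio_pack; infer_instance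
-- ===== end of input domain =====

-- B fuses A's three staged name passes (underscore replace, slice-surgery cap loop,
-- interior-dot loop) into ONE accumulator pass over the original name, and narrows a
-- cut index instead of truncating/re-lowercasing per pattern (objective: faster, as
-- measured).

-- ===== PORT A =====
def pvLetterA (c : Char) : Bool :=
  (decide ('A'.toNat ≤ c.toNat) && decide (c.toNat ≤ 'Z'.toNat)) ||
  (decide ('a'.toNat ≤ c.toNat) && decide (c.toNat ≤ 'z'.toNat))

def pvDigitA (c : Char) : Bool :=
  decide ('0'.toNat ≤ c.toNat) && decide (c.toNat ≤ '9'.toNat)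

-- body of A's first for-loop (cap scan with slice surgery)
def pvCapStepA (st : List Char × Bool) (i : Int) : List Char × Bool :=
  let s := st.1
  let cap := st.2
  let c := PySem.List.pyGetD s i ' '
  let isLetter := pvLetterA c
  if cap && isLetter then
    (PySem.List.slice s none (some i) ++ PySem.Chars.upper [c] ++
       PySem.List.slice s (some (i + 1)) none, false)
  else if !isLetter then (s, true)
  else (s, cap)

-- body of A's second for-loop (interior-dot surgery)
def pvDotStepA (s : List Char) (i : Int) : List Char :=
  let cp := PySem.List.pyGetD s (i - 1) ' '
  let cc := PySem.List.pyGetD s i ' '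
  let cn := PySem.List.pyGetD s (i + 1) ' '
  if cc == '.' && (!pvDigitA cp || !pvDigitA cn) then
    PySem.List.slice s none (some i) ++ [' '] ++ PySem.List.slice s (some (i + 1)) none
  else s

def pvToTitleA (s0 : List Char) : List Char :=
  let s1 := PySem.Chars.replace s0 ['_'] [' ']
  let s2 := ((PySem.List.pyRange 0 (s1.length : Int)).foldl pvCapStepA (s1, true)).1
  (PySem.List.pyRange 1 ((s2.length : Int) - 1)).foldl pvDotStepA s2

-- body of A's pattern loop
def pvCutA (name : List Char) (pat : List Char) : List Char :=
  if PySem.Chars.isIn pat (PySem.Chars.lower name) then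
    PySem.List.slice name none (some (PySem.Chars.find (PySem.Chars.lower name) pat))
  else name

def get_audio_pack (path : String) : String × String :=
  let p0 := path.toList
  let p1 := PySem.List.slice p0 none (some (PySem.Chars.rfind p0 ['/']))
  let p2 := PySem.List.slice p1 none (some (PySem.Chars.rfind p1 ['/']))
  let name := [['/','o','g','g'], ['/','w','a','v'], ['/','d','y','n','o','s'],
               ['/','a','u','d','i','o']].foldl pvCutA p2
  let name := PySem.List.slice name (some (PySem.Chars.rfind name ['/'] + 1)) none
  (String.ofList (pvToTitleA name), String.ofList p2)

-- ===== PORT B =====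
def pvLetterB (c : Char) : Bool :=
  (decide ('A' ≤ c) && decide (c ≤ 'Z')) || (decide ('a' ≤ c) && decide (c ≤ 'z'))

-- body of B's single fused loop: '_'->' ', run-start capitalization, interior-dot
-- rule reading original neighbours; state = (out, cap)
def pvFuseStep (name : List Char) (st : List Char × Bool) (i : Int) : List Char × Bool :=
  let c0 := PySem.List.pyGetD name i ' '
  let c1 := if c0 == '_' then ' ' else c0
  if pvLetterB c1 then
    if st.2 then (st.1 ++ [PySem.Chars.upperChar c1], false) else (st.1 ++ [c1], st.2)
  else
    let c2 := if c1 == '.' && (decide (0 < i) && decide (i < (name.length : Int) - 1)) &&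
        !(PySem.Chars.isdigit (PySem.List.pyGetD name (i - 1) ' ') &&
          PySem.Chars.isdigit (PySem.List.pyGetD name (i + 1) ' ')) then ' ' else c1
    (st.1 ++ [c2], true)

-- B's pattern loop body: narrow the cut index, find restricted to low[:idx]
def pvCutIdxB (low : List Char) (idx : Int) (pat : List Char) : Int :=
  let j := PySem.Chars.findFrom low pat 0 (some idx)
  if j != -1 then j else idx

def get_audio_pack_alt (path : String) : String × String :=
  let p0 := path.toList
  let p1 := PySem.List.slice p0 none (some (PySem.Chars.rfind p0 ['/']))
  let p2 := PySem.List.slice p1 none (some (PySem.Chars.rfind p1 ['/']))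
  let low := PySem.Chars.lower p2
  let idx := [['/','o','g','g'], ['/','w','a','v'], ['/','d','y','n','o','s'],
              ['/','a','u','d','i','o']].foldl (pvCutIdxB low) (p2.length : Int)
  let name := PySem.List.slice p2 none (some idx)
  let name := PySem.List.slice name (some (PySem.Chars.rfind name ['/'] + 1)) none
  let out := (PySem.List.pyRange 0 (name.length : Int)).foldl (pvFuseStep name) ([], true)
  (String.ofList out.1, String.ofList p2)

-- ===== PRECONDITION & SPEC =====
def Spec_get_audio_pack (path : String) (out : String × String) : Prop := out = get_audio_pack_alt path
instance (path : String) (out : String × String) : Decidable (Spec_get_audio_pack path out) := by unfold Spec_get_audio_pack; infer_instance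

-- ===== CLAIM (what is proved, stated in full; the proofs are below) =====
def Claim_equal_get_audio_pack : Prop := ∀ (path : String), Dom_get_audio_pack path → Spec_get_audio_pack path (get_audio_pack path)

-- ===== LEMMAS AND PROOFS =====

-- character-class bridges between the two vocabularies
lemma pvCharLe (a c : Char) : (a ≤ c) ↔ (a.toNat ≤ c.toNat) := by
  rw [Char.le_def, UInt32.le_iff_toNat_le]; rfl

lemma pvLetterA_eq (c : Char) : pvLetterA c = pvLetterB c := by
  unfold pvLetterA pvLetterB
  simp only [pvCharLe]

lemma pvDigitA_eq (c : Char) : pvDigitA c = PySem.Chars.isdigit c := by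
  unfold pvDigitA PySem.Chars.isdigit
  simp only [pvCharLe]

-- '_' -> ' ' as a character map
def pvRepl (c : Char) : Char := if c == '_' then ' ' else c

-- pure recursive descriptions of A's two title passes
def pvCapmap (cap : Bool) : List Char → List Char
  | [] => []
  | c :: t =>
      if pvLetterB c then (if cap then PySem.Chars.upperChar c else c) :: pvCapmap false t
      else c :: pvCapmap true t

def pvCapEnd (cap : Bool) : List Char → Bool
  | [] => cap
  | c :: t => if pvLetterB c then pvCapEnd false t else pvCapEnd true t

def pvDotrun (p : Char) : List Char → List Char
  | [] => []
  | [c] => [c]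
  | c :: d :: r =>
      let c' := if c == '.' && !(PySem.Chars.isdigit p && PySem.Chars.isdigit d) then ' ' else c
      c' :: pvDotrun c' (d :: r)

-- interior-dot pass on a whole string: the first character is never touched
def pvDotTop : List Char → List Char
  | [] => []
  | c :: r => c :: pvDotrun c r

-- pure recursive description of B's fused loop over the ORIGINAL characters
def pvFused : Bool → Option Char → List Char → List Char
  | _, _, [] => []
  | cap, prev, c :: rest =>
    let c1 := if c == '_' then ' ' else c
    if pvLetterB c1 then
      (if cap then PySem.Chars.upperChar c1 else c1) :: pvFused false (some c) rest
    else
      (match prev, rest with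
       | some p, d :: _ =>
           if c1 == '.' && !(PySem.Chars.isdigit p && PySem.Chars.isdigit d) then ' ' else c1
       | _, _ => c1) :: pvFused true (some c) rest

lemma pvFused_cons_letter (cap : Bool) (prev : Option Char) (c : Char) (rest : List Char)
    (h : pvLetterB (pvRepl c) = true) :
    pvFused cap prev (c :: rest)
      = (if cap then PySem.Chars.upperChar (pvRepl c) else pvRepl c) :: pvFused false (some c) rest := by
  simp only [pvFused]
  rw [show (if c == '_' then ' ' else c) = pvRepl c from rfl, if_pos h]

lemma pvFused_cons_nl_none (cap : Bool) (c : Char) (rest : List Char)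
    (h : pvLetterB (pvRepl c) = false) :
    pvFused cap none (c :: rest) = pvRepl c :: pvFused true (some c) rest := by
  simp only [pvFused]
  rw [show (if c == '_' then ' ' else c) = pvRepl c from rfl, if_neg (by simp [h])]

lemma pvFused_cons_nl_nil (cap : Bool) (prev : Option Char) (c : Char)
    (h : pvLetterB (pvRepl c) = false) :
    pvFused cap prev [c] = [pvRepl c] := by
  simp only [pvFused]
  rw [show (if c == '_' then ' ' else c) = pvRepl c from rfl, if_neg (by simp [h])]

lemma pvFused_cons_nl_some (cap : Bool) (p c d : Char) (r : List Char)
    (h : pvLetterB (pvRepl c) = false) :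
    pvFused cap (some p) (c :: d :: r)
      = (if pvRepl c == '.' && !(PySem.Chars.isdigit p && PySem.Chars.isdigit d) then ' '
         else pvRepl c) :: pvFused true (some c) (d :: r) := by
  simp only [pvFused]
  rw [show (if c == '_' then ' ' else c) = pvRepl c from rfl, if_neg (by simp [h])]

lemma pvCapmap_cons_letter (cap : Bool) (x : Char) (xs : List Char) (h : pvLetterB x = true) :
    pvCapmap cap (x :: xs) = (if cap then PySem.Chars.upperChar x else x) :: pvCapmap false xs := by
  simp [pvCapmap, h]

lemma pvCapmap_cons_nl (cap : Bool) (x : Char) (xs : List Char) (h : pvLetterB x = false) :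
    pvCapmap cap (x :: xs) = x :: pvCapmap true xs := by
  simp [pvCapmap, h]

lemma pvDotrun_cons_cons (p c d : Char) (r : List Char) :
    pvDotrun p (c :: d :: r)
      = (if c == '.' && !(PySem.Chars.isdigit p && PySem.Chars.isdigit d) then ' ' else c)
        :: pvDotrun (if c == '.' && !(PySem.Chars.isdigit p && PySem.Chars.isdigit d) then ' ' else c) (d :: r) := rfl

lemma pvDotrun_cons_ne (q y : Char) (ys : List Char) (h : (y == '.') = false) :
    pvDotrun q (y :: ys) = y :: pvDotrun y ys := by
  cases ys with
  | nil => rfl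
  | cons z zs => rw [pvDotrun_cons_cons]; simp [h]

lemma pvUpper_digit (c : Char) : PySem.Chars.isdigit (PySem.Chars.upperChar c) = PySem.Chars.isdigit c := by
  unfold PySem.Chars.upperChar
  by_cases h : PySem.Chars.islower c = true
  · rw [if_pos h]
    unfold PySem.Chars.islower at h
    simp only [Bool.and_eq_true, decide_eq_true_eq, pvCharLe] at h
    have ha : ('a').toNat = 97 := rfl
    have hz : ('z').toNat = 122 := rfl
    rw [ha, hz] at h
    unfold PySem.Chars.isdigit
    simp only [pvCharLe]
    have h32 : (Char.ofNat (c.toNat - 32)).toNat = c.toNat - 32 := by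
      rw [Char.toNat_ofNat, if_pos (Or.inl (by omega) : Nat.isValidChar (c.toNat - 32))]
    simp only [h32]
    have h0 : ('0').toNat = 48 := rfl
    have h9 : ('9').toNat = 57 := rfl
    rw [h0, h9]
    congr 1 <;> simp only [decide_eq_decide] <;> omega
  · rw [if_neg h]

lemma pvUpper_letter (c : Char) (h : pvLetterB c = true) : pvLetterB (PySem.Chars.upperChar c) = true := by
  unfold PySem.Chars.upperChar
  by_cases hlo : PySem.Chars.islower c = true
  · rw [if_pos hlo]
    unfold PySem.Chars.islower at hlo
    simp only [Bool.and_eq_true, decide_eq_true_eq, pvCharLe] at hlo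
    have ha : ('a').toNat = 97 := rfl
    have hz : ('z').toNat = 122 := rfl
    rw [ha, hz] at hlo
    have h32 : (Char.ofNat (c.toNat - 32)).toNat = c.toNat - 32 := by
      rw [Char.toNat_ofNat, if_pos (Or.inl (by omega) : Nat.isValidChar (c.toNat - 32))]
    unfold pvLetterB
    simp only [pvCharLe, h32, Bool.or_eq_true, Bool.and_eq_true, decide_eq_true_eq]
    left
    constructor <;> [show ('A').toNat ≤ _; show _ ≤ ('Z').toNat] <;>
      [(show (65:Nat) ≤ _); (show _ ≤ (90:Nat))] <;> omega
  · rw [if_neg hlo]; exact h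

lemma pvLetter_ne_dot (y : Char) (h : pvLetterB y = true) : (y == '.') = false := by
  by_contra hcon
  simp only [Bool.not_eq_false, beq_iff_eq] at hcon
  rw [hcon] at h
  exact absurd h (by decide)

lemma pvRepl_digit (c : Char) : PySem.Chars.isdigit (pvRepl c) = PySem.Chars.isdigit c := by
  unfold pvRepl
  by_cases h : c = '_'
  · subst h; decide
  · simp [h]

lemma pvFuse_eq (rest : List Char) : ∀ (cap : Bool) (p q : Char),
    PySem.Chars.isdigit q = PySem.Chars.isdigit p →
    pvFused cap (some p) rest = pvDotrun q (pvCapmap cap (rest.map pvRepl)) := by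
  induction rest with
  | nil => intro cap p q _; rfl
  | cons c rest ih =>
    intro cap p q hq
    cases hl : pvLetterB (pvRepl c)
    · -- non-letter head
      match rest with
      | [] =>
        rw [pvFused_cons_nl_nil _ _ _ hl, List.map_cons, List.map_nil,
          pvCapmap_cons_nl _ _ _ hl]
        rfl
      | d :: r =>
        rw [pvFused_cons_nl_some _ _ _ _ _ hl, List.map_cons, pvCapmap_cons_nl _ _ _ hl]
        set c2 := (if pvRepl c == '.' && !(PySem.Chars.isdigit p && PySem.Chars.isdigit d) then ' '
          else pvRepl c) with hc2
        have hc2d : PySem.Chars.isdigit c2 = PySem.Chars.isdigit c := by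
          rw [hc2]
          by_cases hdot : ((pvRepl c == '.') && !(PySem.Chars.isdigit p && PySem.Chars.isdigit d)) = true
          · rw [if_pos hdot]
            simp only [Bool.and_eq_true, beq_iff_eq] at hdot
            rw [← pvRepl_digit c, hdot.1]
            decide
          · rw [if_neg hdot, pvRepl_digit]
        have hT : ∃ d2 rr, pvCapmap true (List.map pvRepl (d :: r)) = d2 :: rr ∧
            PySem.Chars.isdigit d2 = PySem.Chars.isdigit d := by
          rw [List.map_cons]
          cases hld : pvLetterB (pvRepl d)
          · rw [pvCapmap_cons_nl _ _ _ hld]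
            exact ⟨_, _, rfl, pvRepl_digit d⟩
          · rw [pvCapmap_cons_letter _ _ _ hld]
            exact ⟨_, _, rfl, by simp [pvUpper_digit, pvRepl_digit]⟩
        obtain ⟨d2, rr, hT, hd2⟩ := hT
        rw [hT, pvDotrun_cons_cons, hq, hd2, ← hc2]
        congr 1
        rw [← hT]
        exact ih true c c2 (by rw [hc2d])
    · -- letter head
      rw [pvFused_cons_letter _ _ _ _ hl, List.map_cons, pvCapmap_cons_letter _ _ _ hl]
      have hyl : pvLetterB (if cap then PySem.Chars.upperChar (pvRepl c) else pvRepl c) = true := by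
        cases cap
        · simpa using hl
        · simpa using pvUpper_letter _ hl
      rw [pvDotrun_cons_ne q _ _ (pvLetter_ne_dot _ hyl)]
      congr 1
      exact ih false c _ (by cases cap <;> simp [pvUpper_digit, pvRepl_digit])

lemma pvFused_none (name : List Char) :
    pvFused true none name = pvDotTop (pvCapmap true (name.map pvRepl)) := by
  match name with
  | [] => rfl
  | c :: rest =>
    cases hl : pvLetterB (pvRepl c)
    · rw [pvFused_cons_nl_none _ _ _ hl, List.map_cons, pvCapmap_cons_nl _ _ _ hl]
      rw [pvFuse_eq rest true c (pvRepl c) (pvRepl_digit c)]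
      simp [pvDotTop]
    · rw [pvFused_cons_letter _ _ _ _ hl, List.map_cons, pvCapmap_cons_letter _ _ _ hl]
      simp only [if_true]
      rw [pvFuse_eq rest false c (PySem.Chars.upperChar (pvRepl c))
        (by rw [pvUpper_digit, pvRepl_digit])]
      simp [pvDotTop]

-- index/slice facts at the boundary of a processed prefix (used by the loop lemmas)
lemma pvGetMid (u t : List Char) (c d : Char) :
    PySem.List.pyGetD (u ++ c :: t) (u.length : Int) d = c := by
  simp [PySem.List.pyGetD, PySem.List.pyGet?, PySem.List.pyIdx?]

lemma pvTakeMid (u t : List Char) (c : Char) :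
    PySem.List.slice (u ++ c :: t) none (some (u.length : Int)) = u := by
  rw [PySem.List.slice_to_natCast]
  exact List.take_left

lemma pvDropMid (u t : List Char) (c : Char) :
    PySem.List.slice (u ++ c :: t) (some ((u.length : Int) + 1)) none = t := by
  have h : ((u.length : Int) + 1) = ((u.length + 1 : Nat) : Int) := by push_cast; ring
  rw [h, PySem.List.slice_from_natCast]
  have h2 : u.length + 1 = (u ++ [c]).length := by simp
  rw [show u ++ c :: t = (u ++ [c]) ++ t by simp, h2, List.drop_left]

-- A's cap loop, started after a processed prefix u, is capmap on the suffix
lemma pvCapA (v : List Char) : ∀ (u : List Char) (cap : Bool) (a b : Int),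
    a = u.length → b = a + v.length →
    (PySem.List.pyRange a b).foldl pvCapStepA (u ++ v, cap) = (u ++ pvCapmap cap v, pvCapEnd cap v) := by
  induction v with
  | nil =>
    intro u cap a b ha hb
    simp only [List.length_nil, Nat.cast_zero, add_zero] at hb
    rw [PySem.List.pyRange_one_eq_nil (by omega)]
    simp [pvCapmap, pvCapEnd]
  | cons c t ih =>
    intro u cap a b ha hb
    subst ha
    simp only [List.length_cons] at hb
    rw [PySem.List.pyRange_one_cons (by push_cast at hb ⊢; omega), List.foldl_cons]
    have hb' : b = ((u.length : Int) + 1) + t.length := by push_cast at hb ⊢; omega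
    cases hl : pvLetterB c <;> cases cap
    · have hstep : pvCapStepA (u ++ c :: t, false) (u.length : Int) = ((u ++ [c]) ++ t, true) := by
        simp [pvCapStepA, pvGetMid, pvTakeMid, pvDropMid, pvLetterA_eq, hl]
      rw [hstep, ih (u ++ [c]) true ((u.length : Int) + 1) b (by simp) hb']
      simp [pvCapmap, pvCapEnd, hl]
    · have hstep : pvCapStepA (u ++ c :: t, true) (u.length : Int) = ((u ++ [c]) ++ t, true) := by
        simp [pvCapStepA, pvGetMid, pvTakeMid, pvDropMid, pvLetterA_eq, hl]
      rw [hstep, ih (u ++ [c]) true ((u.length : Int) + 1) b (by simp) hb']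
      simp [pvCapmap, pvCapEnd, hl]
    · have hstep : pvCapStepA (u ++ c :: t, false) (u.length : Int) = ((u ++ [c]) ++ t, false) := by
        simp [pvCapStepA, pvGetMid, pvTakeMid, pvDropMid, pvLetterA_eq, hl]
      rw [hstep, ih (u ++ [c]) false ((u.length : Int) + 1) b (by simp) hb']
      simp [pvCapmap, pvCapEnd, hl]
    · have hstep : pvCapStepA (u ++ c :: t, true) (u.length : Int)
          = ((u ++ [PySem.Chars.upperChar c]) ++ t, false) := by
        simp [pvCapStepA, pvGetMid, pvTakeMid, pvDropMid, pvLetterA_eq, hl, PySem.Chars.upper]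
      rw [hstep, ih (u ++ [PySem.Chars.upperChar c]) false ((u.length : Int) + 1) b (by simp) hb']
      simp [pvCapmap, pvCapEnd, hl]

-- A's dot loop after a processed prefix is dotrun on the suffix
lemma pvDotA (v : List Char) : ∀ (u0 : List Char) (c : Char) (a b : Int),
    a = u0.length + 1 → b = a + v.length - 1 →
    (PySem.List.pyRange a b).foldl pvDotStepA (u0 ++ c :: v) = u0 ++ c :: pvDotrun c v := by
  induction v with
  | nil =>
    intro u0 c a b ha hb
    simp only [List.length_nil, Nat.cast_zero, add_zero] at hb
    rw [PySem.List.pyRange_one_eq_nil (by omega)]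
    simp [pvDotrun]
  | cons d v' ih =>
    intro u0 c a b ha hb
    match v', ih with
    | [], _ =>
      rw [PySem.List.pyRange_one_eq_nil (by simp at hb; omega)]
      simp [pvDotrun]
    | e :: r, ih =>
      subst ha
      rw [PySem.List.pyRange_one_cons (by simp at hb ⊢; omega), List.foldl_cons]
      have hget1 : PySem.List.pyGetD (u0 ++ c :: d :: e :: r) ((u0.length : Int) + 1 - 1) ' ' = c := by
        rw [show ((u0.length : Int) + 1 - 1) = (u0.length : Int) by ring, pvGetMid]
      have hget2 : PySem.List.pyGetD (u0 ++ c :: d :: e :: r) ((u0.length : Int) + 1) ' ' = d := by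
        rw [show ((u0.length : Int) + 1) = (((u0 ++ [c]).length : Nat) : Int) by simp,
          show u0 ++ c :: d :: e :: r = (u0 ++ [c]) ++ d :: e :: r by simp, pvGetMid]
      have hget3 : PySem.List.pyGetD (u0 ++ c :: d :: e :: r) ((u0.length : Int) + 1 + 1) ' ' = e := by
        rw [show ((u0.length : Int) + 1 + 1) = (((u0 ++ [c, d]).length : Nat) : Int) by
            simp only [List.length_append, List.length_cons, List.length_nil]; push_cast; ring,
          show u0 ++ c :: d :: e :: r = (u0 ++ [c, d]) ++ e :: r by simp, pvGetMid]
      have htake : PySem.List.slice (u0 ++ c :: d :: e :: r) none (some ((u0.length : Int) + 1)) = u0 ++ [c] := by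
        rw [show ((u0.length : Int) + 1) = (((u0 ++ [c]).length : Nat) : Int) by simp,
          show u0 ++ c :: d :: e :: r = (u0 ++ [c]) ++ d :: e :: r by simp, pvTakeMid]
      have hdrop : PySem.List.slice (u0 ++ c :: d :: e :: r) (some ((u0.length : Int) + 1 + 1)) none = e :: r := by
        rw [show u0 ++ c :: d :: e :: r = (u0 ++ [c]) ++ d :: e :: r by simp,
          show ((u0.length : Int) + 1 + 1) = (((u0 ++ [c]).length : Nat) : Int) + 1 by
            simp only [List.length_append, List.length_cons, List.length_nil]; push_cast; ring, pvDropMid]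
      have hstep : pvDotStepA (u0 ++ c :: d :: e :: r) ((u0.length : Int) + 1)
          = u0 ++ c :: (if d == '.' && !(PySem.Chars.isdigit c && PySem.Chars.isdigit e) then ' ' else d) :: e :: r := by
        simp only [pvDotStepA, hget1, hget2, hget3, htake, hdrop, pvDigitA_eq]
        cases hd : (d == '.') <;> cases h1 : PySem.Chars.isdigit c <;> cases h2 : PySem.Chars.isdigit e <;> simp
      rw [hstep]
      set d' := (if d == '.' && !(PySem.Chars.isdigit c && PySem.Chars.isdigit e) then ' ' else d) with hd'
      have hih := ih (u0 ++ [c]) d' ((u0.length : Int) + 1 + 1) b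
        (by simp only [List.length_append, List.length_cons, List.length_nil]; push_cast; ring)
        (by simp only [List.length_cons] at hb ⊢; push_cast at hb ⊢; omega)
      rw [show u0 ++ c :: d' :: e :: r = (u0 ++ [c]) ++ d' :: e :: r by simp, hih]
      have hrun : pvDotrun c (d :: e :: r) = d' :: pvDotrun d' (e :: r) := by
        simp only [pvDotrun]
        rw [← hd']
      rw [hrun]
      simp

-- A's to_title is: underscore replace, capmap, then the interior-dot pass
lemma pvTitleA_eq (cs : List Char) :
    pvToTitleA cs = pvDotTop (pvCapmap true (PySem.Chars.replace cs ['_'] [' '])) := by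
  unfold pvToTitleA
  dsimp only
  set s1 := PySem.Chars.replace cs ['_'] [' '] with hs1
  have hcapA : ((PySem.List.pyRange 0 (s1.length : Int)).foldl pvCapStepA (s1, true)).1
      = pvCapmap true s1 := by
    have := pvCapA s1 [] true 0 ((s1.length : Int)) (by simp) (by simp)
    simp at this
    rw [this]
  rw [hcapA]
  match htc : pvCapmap true s1 with
  | [] => simp [PySem.List.pyRange_one_eq_nil, pvDotTop]
  | c0 :: rest =>
    have hA := pvDotA rest [] c0 1 ((((c0 :: rest).length : Nat) : Int) - 1) (by simp)
      (by simp only [List.length_cons]; push_cast; ring)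
    simp only [List.nil_append] at hA
    rw [hA, pvDotTop]

-- replace by a single character is a map
lemma pvReplaceGo (l : List Char) : ∀ (fuel : Nat) (acc : List Char), l.length ≤ fuel →
    PySem.Chars.replace.go ['_'] [' '] fuel l acc = acc.reverse ++ l.map pvRepl := by
  induction l with
  | nil =>
    intro fuel acc _
    cases fuel <;> simp [PySem.Chars.replace.go]
  | cons c t ih =>
    intro fuel acc hf
    match fuel with
    | 0 => simp at hf
    | fuel + 1 =>
      simp only [PySem.Chars.replace.go]
      by_cases hc : c = '_'
      · subst hc
        rw [if_pos (by simp [List.isPrefixOf]),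
          show List.drop (['_'] : List Char).length ('_' :: t) = t from rfl]
        rw [ih fuel _ (by simp at hf; omega)]
        simp [pvRepl]
      · rw [if_neg (by simp [List.isPrefixOf]; exact fun h => hc h.symm)]
        rw [ih fuel _ (by simp at hf; omega)]
        simp [pvRepl, hc]

lemma pvReplace_eq (cs : List Char) :
    PySem.Chars.replace cs ['_'] [' '] = cs.map pvRepl := by
  unfold PySem.Chars.replace
  rw [if_neg (by simp), pvReplaceGo cs cs.length [] (le_refl _)]
  simp

-- B's foldl loop computes pvFused (suffix induction with a processed prefix)
lemma pvFoldB (name : List Char) : ∀ (v : List Char) (k : Nat), name.drop k = v →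
    ∀ (acc : List Char) (cap : Bool),
    ((PySem.List.pyRange (k : Int) (name.length : Int)).foldl (pvFuseStep name) (acc, cap)).1
      = acc ++ pvFused cap (if k = 0 then none else some (PySem.List.pyGetD name ((k : Int) - 1) ' ')) v := by
  intro v
  induction v with
  | nil =>
    intro k hk acc cap
    have hlen : name.length ≤ k := by
      by_contra h
      have : name.drop k ≠ [] := by simp [List.drop_eq_nil_iff]; omega
      exact this hk
    rw [PySem.List.pyRange_one_eq_nil (by exact_mod_cast hlen)]
    cases k <;> simp [pvFused]
  | cons c rest ih =>
    intro k hk acc cap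
    have hklt : k < name.length := by
      have := congrArg List.length hk; simp at this; omega
    have hget : PySem.List.pyGetD name (k : Int) ' ' = c := by
      have h0 : (name.drop k)[0]? = some c := by rw [hk]; rfl
      rw [List.getElem?_drop] at h0
      simp only [Nat.add_zero] at h0
      obtain ⟨_, hv⟩ := List.getElem?_eq_some_iff.mp h0
      simp [PySem.List.pyGetD, PySem.List.pyGet?, PySem.List.pyIdx?, hklt, hv]
    have htail : name.drop (k + 1) = rest := by
      have h0 := List.drop_drop (i := 1) (j := k) (l := name)
      rw [hk] at h0
      simpa using h0.symm
    rw [PySem.List.pyRange_one_cons (by exact_mod_cast hklt), List.foldl_cons]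
    have hcast : ((k : Int) + 1) = ((k + 1 : Nat) : Int) := by push_cast; ring
    have hprevnew : (if k + 1 = 0 then none
        else some (PySem.List.pyGetD name (((k + 1 : Nat) : Int) - 1) ' ')) = some c := by
      rw [if_neg (by omega)]
      rw [show (((k + 1 : Nat) : Int) - 1) = (k : Int) by push_cast; ring, hget]
    have hc1 : (if (PySem.List.pyGetD name (k : Int) ' ') == '_' then ' '
        else PySem.List.pyGetD name (k : Int) ' ') = pvRepl c := by
      rw [hget]; rfl
    cases hl : pvLetterB (pvRepl c)
    · -- non-letter step
      have hstep : pvFuseStep name (acc, cap) (k : Int)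
          = (acc ++ [if pvRepl c == '.' && (decide (0 < (k:Int)) && decide ((k:Int) < (name.length : Int) - 1)) &&
              !(PySem.Chars.isdigit (PySem.List.pyGetD name ((k:Int) - 1) ' ') &&
                PySem.Chars.isdigit (PySem.List.pyGetD name ((k:Int) + 1) ' ')) then ' ' else pvRepl c], true) := by
        simp only [pvFuseStep, hc1]
        rw [if_neg (by simp [hl])]
      rw [hstep, hcast, ih (k + 1) htail _ true, hprevnew, List.append_assoc]
      congr 1
      by_cases hk0 : k = 0
      · subst hk0
        rw [if_pos rfl, pvFused_cons_nl_none _ _ _ hl]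
        norm_num
      · rw [if_neg hk0]
        cases rest with
        | nil =>
          rw [pvFused_cons_nl_nil _ _ _ hl]
          have hnlt : ¬ ((k : Int) < (name.length : Int) - 1) := by
            have := congrArg List.length htail
            simp at this
            omega
          simp [hnlt, pvFused]
        | cons d r =>
          have hlen2 : k + 2 ≤ name.length := by
            have := congrArg List.length htail
            simp at this
            omega
          have hgetd : PySem.List.pyGetD name ((k : Int) + 1) ' ' = d := by
            have h1 : name[k+1]? = some d := by
              have h0 : (name.drop (k + 1))[0]? = some d := by rw [htail]; rfl
              rw [List.getElem?_drop] at h0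
              simpa using h0
            have hlt : ((k : Int) + 1) < (name.length : Int) := by omega
            have hge : (0 : Int) ≤ (k : Int) + 1 := by omega
            simp only [PySem.List.pyGetD, PySem.List.pyGet?, PySem.List.pyIdx?, if_pos hlt, if_pos hge]
            have htn : ((k : Int) + 1).toNat = k + 1 := by omega
            simp [htn, h1]
          rw [pvFused_cons_nl_some _ _ _ _ _ hl]
          have h0k : (0 : Int) < (k : Int) := by omega
          have h0k' : 0 < k := by omega
          have hkn : (k : Int) < (name.length : Int) - 1 := by omega
          simp [h0k, h0k', hkn, hgetd]
    · -- letter step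
      have hstep : pvFuseStep name (acc, cap) (k : Int)
          = (acc ++ [if cap then PySem.Chars.upperChar (pvRepl c) else pvRepl c], false) := by
        simp only [pvFuseStep, hc1]
        rw [if_pos (by simp [hl])]
        cases cap <;> simp
      rw [hstep, hcast, ih (k + 1) htail _ false, hprevnew, List.append_assoc]
      congr 1
      cases hk0 : (if k = 0 then (none : Option Char) else some (PySem.List.pyGetD name ((k : Int) - 1) ' ')) <;>
        rw [pvFused_cons_letter _ _ _ _ hl] <;> simp

-- the two title computations agree
lemma pvTitle_eq (cs : List Char) :
    pvToTitleA cs = ((PySem.List.pyRange 0 (cs.length : Int)).foldl (pvFuseStep cs) ([], true)).1 := by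
  have hB : ((PySem.List.pyRange ((0 : Nat) : Int) (cs.length : Int)).foldl (pvFuseStep cs) ([], true)).1
      = [] ++ pvFused true (if (0:Nat) = 0 then none else some (PySem.List.pyGetD cs (((0:Nat) : Int) - 1) ' ')) cs :=
    pvFoldB cs cs 0 (by simp) [] true
  simp only [Nat.cast_zero, if_pos rfl, List.nil_append] at hB
  rw [pvTitleA_eq, pvReplace_eq, ← pvFused_none cs]
  exact_mod_cast hB.symm

-- find with an end bound at a natural k is find on the prefix
lemma pvFindFrom_take (s sub : List Char) (k : Nat) (hk : k ≤ s.length) :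
    PySem.Chars.findFrom s sub 0 (some (k : Int)) = PySem.Chars.find (s.take k) sub := by
  unfold PySem.Chars.findFrom
  dsimp only
  have h1 : ¬ ((s.length : Int) < (k : Int)) := by exact_mod_cast Nat.not_lt.mpr hk
  rw [if_neg h1, if_neg (by omega : ¬ ((k:Int) < 0)), if_neg (by omega : ¬ ((0:Int) < 0)),
      if_neg (by omega : ¬ ((k:Int) < 0))]
  simp only [Int.toNat_natCast, Int.toNat_zero, List.drop_zero]
  rcases eq_or_ne (PySem.Chars.find (List.take k s) sub) (-1) with h | h
  · rw [if_pos h, h]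
  · rw [if_neg h]; omega

lemma pvCut_step (p2 pat : List Char) (k : Nat) (hk : k ≤ p2.length) :
    ∃ k' : Nat, k' ≤ k ∧ pvCutIdxB (PySem.Chars.lower p2) (k : Int) pat = (k' : Int) ∧
      pvCutA (p2.take k) pat = p2.take k' := by
  have hlow : PySem.Chars.lower (p2.take k) = (PySem.Chars.lower p2).take k := by
    simp [PySem.Chars.lower, List.map_take]
  have hlen : k ≤ (PySem.Chars.lower p2).length := by
    simp [PySem.Chars.lower, hk]
  have hff : PySem.Chars.findFrom (PySem.Chars.lower p2) pat 0 (some (k : Int))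
      = PySem.Chars.find ((PySem.Chars.lower p2).take k) pat := pvFindFrom_take _ _ _ hlen
  set j := PySem.Chars.find ((PySem.Chars.lower p2).take k) pat with hj
  rcases eq_or_ne j (-1) with h | h
  · refine ⟨k, le_refl _, ?_, ?_⟩
    · simp only [pvCutIdxB, hff, ← hj, h]; norm_num
    · simp only [pvCutA, hlow, ← hj, PySem.Chars.isIn, h]; norm_num
  · have hj0 : 0 ≤ j := by
      have := PySem.Chars.neg_one_le_find ((PySem.Chars.lower p2).take k) pat
      rw [← hj] at this; omega
    have hjk : j ≤ (k : Int) := by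
      have := PySem.Chars.find_le_length ((PySem.Chars.lower p2).take k) pat
      rw [← hj] at this
      have hlt : ((PySem.Chars.lower p2).take k).length = k := by
        simp [List.length_take]; omega
      omega
    refine ⟨j.toNat, by omega, ?_, ?_⟩
    · simp only [pvCutIdxB, hff, ← hj]
      rw [if_pos (by simpa using h)]
      omega
    · simp only [pvCutA, hlow, ← hj, PySem.Chars.isIn]
      rw [if_pos (by simpa using h), PySem.List.slice_to _ hj0, List.take_take]
      congr 1
      omega

lemma pvCut_fold (p2 : List Char) : ∀ (pats : List (List Char)) (k : Nat), k ≤ p2.length →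
    ∃ k' : Nat, k' ≤ k ∧ pats.foldl (pvCutIdxB (PySem.Chars.lower p2)) (k : Int) = (k' : Int) ∧
      pats.foldl pvCutA (p2.take k) = p2.take k' := by
  intro pats
  induction pats with
  | nil => intro k hk; exact ⟨k, le_refl _, rfl, rfl⟩
  | cons pat rest ih =>
    intro k hk
    obtain ⟨k1, hk1, hb1, ha1⟩ := pvCut_step p2 pat k hk
    obtain ⟨k', hk', hb2, ha2⟩ := ih k1 (by omega)
    exact ⟨k', by omega, by rw [List.foldl_cons, hb1, hb2], by rw [List.foldl_cons, ha1, ha2]⟩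

lemma pvMain (path : String) : get_audio_pack path = get_audio_pack_alt path := by
  unfold get_audio_pack get_audio_pack_alt
  dsimp only
  set p2 := PySem.List.slice (PySem.List.slice path.toList none (some (PySem.Chars.rfind path.toList ['/']))) none
      (some (PySem.Chars.rfind (PySem.List.slice path.toList none (some (PySem.Chars.rfind path.toList ['/']))) ['/'])) with hp2
  obtain ⟨k', hk', hb, ha⟩ := pvCut_fold p2
    [['/','o','g','g'], ['/','w','a','v'], ['/','d','y','n','o','s'], ['/','a','u','d','i','o']]
    p2.length (le_refl _)
  rw [List.take_length] at ha
  rw [ha, hb, PySem.List.slice_to_natCast, pvTitle_eq]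

-- ===== VERDICT (by name: the statement is the Claim_ definition above) =====
theorem get_audio_pack_spec : Claim_equal_get_audio_pack := by
  intro path _
  unfold Spec_get_audio_pack
  exact pvMain path
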